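-- pv_equiv track=rewrite | github.com/fredericktutu/Interview-Problems | 20200320 aliyun/test1.py | all_zero
-- ===== SOURCE A (Python) =====
-- def all_zero(lst):
--     flag = 1
--     for x in lst:
--         if x > 0:
--             flag = 0
--         elif x < 0:
--             return -1
--     return flag
-- ===== SOURCE B (Python) =====
-- def all_zero(lst):
--     if any(x < 0 for x in lst):
--         return -1
--     if any(x > 0 for x in lst):
--         return 0
--     return 1
-- ===== Notes on version B (the rewrite author's own statement) =====
-- stated objective: idiomatic
-- what changed: Replaced the single flag-maintaining loop with two short-circuiting any() scans: any negative gives -1, else any positive gives 0, else 1.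
import Mathlib
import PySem

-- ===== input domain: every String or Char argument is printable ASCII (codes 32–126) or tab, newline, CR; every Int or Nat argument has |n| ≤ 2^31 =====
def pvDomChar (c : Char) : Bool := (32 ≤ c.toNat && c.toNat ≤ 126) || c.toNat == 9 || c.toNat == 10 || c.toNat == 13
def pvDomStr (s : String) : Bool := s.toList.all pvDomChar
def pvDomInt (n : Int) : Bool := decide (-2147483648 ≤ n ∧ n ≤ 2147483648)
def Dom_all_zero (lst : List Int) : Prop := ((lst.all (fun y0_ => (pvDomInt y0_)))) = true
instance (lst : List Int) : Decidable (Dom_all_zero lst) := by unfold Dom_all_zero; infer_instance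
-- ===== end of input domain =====

-- B replaces A's flag-maintaining loop with two short-circuiting any-scans (idiomatic).

-- ===== PORT A =====
-- literal port of A's loop: flag accumulator, early return -1 on a negative
def all_zero_loop (lst : List Int) (flag : Int) : Int :=
  match lst with
  | [] => flag
  | x :: rest =>
    if x > 0 then all_zero_loop rest 0
    else if x < 0 then -1
    else all_zero_loop rest flag

def all_zero (lst : List Int) : Int := all_zero_loop lst 1

-- ===== PORT B =====
def all_zero_alt (lst : List Int) : Int :=
  if lst.any (fun x => x < 0) then -1
  else if lst.any (fun x => x > 0) then 0
  else 1

-- ===== PRECONDITION & SPEC =====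
def Spec_all_zero (lst : List Int) (out : Int) : Prop := out = all_zero_alt lst
instance (lst : List Int) (out : Int) : Decidable (Spec_all_zero lst out) := by unfold Spec_all_zero; infer_instance

-- ===== CLAIM (what is proved, stated in full; the proofs are below) =====
def Claim_equal_all_zero : Prop := ∀ (lst : List Int), Dom_all_zero lst → Spec_all_zero lst (all_zero lst)

-- ===== LEMMAS AND PROOFS =====
lemma all_zero_loop_eq (lst : List Int) (flag : Int) :
    all_zero_loop lst flag =
      if lst.any (fun x => x < 0) then -1
      else if lst.any (fun x => x > 0) then 0
      else flag := by
  induction lst generalizing flag with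
  | nil => simp [all_zero_loop]
  | cons x rest ih =>
    simp only [all_zero_loop, List.any_cons]
    rcases lt_trichotomy x 0 with h | h | h
    · simp [h, not_lt.mpr h.le]
    · subst h; simp [ih]
    · rw [if_pos h, ih]
      simp [h, not_lt.mpr h.le]

-- ===== VERDICT (by name: the statement is the Claim_ definition above) =====
theorem all_zero_spec : Claim_equal_all_zero := by
  intro lst _
  unfold Spec_all_zero all_zero all_zero_alt
  rw [all_zero_loop_eq]
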